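-- pv_equiv track=rewrite | github.com/GeekSky98/Algorithm_lab | Programmers/Lv._2/기능개발/explanation.py | solution
-- ===== SOURCE A (Python) =====
-- from collections import deque
-- from math import ceil
--
-- def solution(progresses, speeds):
--     answer = []
--
--     queue = deque()
--
--     for p, s in zip(progresses, speeds):
--         queue.append(ceil((100-p)/s))
--
--     while queue:
--         now = queue.popleft()
--         cnt = 1
--
--         while queue and queue[0] <= now:
--             queue.popleft()
--             cnt += 1
--
--         answer.append(cnt)
--
--     return answer
-- ===== SOURCE B (Python) =====
-- def solution(progresses, speeds):
--     answer = []
--     leader = 0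
--     count = 0
--     for p, s in zip(progresses, speeds):
--         d = -((p - 100) // s)  # ceil((100-p)/s) exactly, in integers
--         if count == 0:
--             leader, count = d, 1
--         elif d <= leader:
--             count += 1
--         else:
--             answer.append(count)
--             leader, count = d, 1
--     if count:
--         answer.append(count)
--     return answer
-- ===== Notes on version B (the rewrite author's own statement) =====
-- stated objective: simpler
-- what changed: Replaces the deque with a nested pop-while inner loop by one flat forward pass that keeps the current group's leader day-count and a running count, appending the count when a larger day-count starts a new group (and exact integer ceiling division instead of float ceil).
-- outside the precondition, e.g. on solution([50], [0]): A raises ZeroDivisionError, B raises ZeroDivisionError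
import Mathlib
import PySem

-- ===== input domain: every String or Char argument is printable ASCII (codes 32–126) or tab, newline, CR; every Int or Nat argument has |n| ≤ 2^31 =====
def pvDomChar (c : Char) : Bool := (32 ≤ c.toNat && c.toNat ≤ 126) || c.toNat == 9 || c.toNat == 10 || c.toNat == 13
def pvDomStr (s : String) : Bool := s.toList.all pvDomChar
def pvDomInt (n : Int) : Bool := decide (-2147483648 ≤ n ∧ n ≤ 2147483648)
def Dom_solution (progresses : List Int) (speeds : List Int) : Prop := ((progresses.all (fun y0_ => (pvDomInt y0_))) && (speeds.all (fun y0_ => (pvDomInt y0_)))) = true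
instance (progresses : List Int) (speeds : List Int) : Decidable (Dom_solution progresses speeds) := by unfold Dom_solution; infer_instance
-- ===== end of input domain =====

-- B replaces A's deque with its nested pop-while inner loop by one flat forward pass
-- keeping the current group's leader day-count and a running count (objective: simpler).

-- ===== PORT A =====
-- inner 'while queue and queue[0] <= now: popleft; cnt += 1' :
-- returns (number of elements popped, remaining queue)
def popCountA (now : Int) : List Int → Int × List Int
  | [] => (0, [])
  | x :: xs =>
      if x ≤ now then
        let pr := popCountA now xs
        (pr.1 + 1, pr.2)
      else (0, x :: xs)

theorem popCountA_length (now : Int) : ∀ xs : List Int, (popCountA now xs).2.length ≤ xs.length := by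
  intro xs
  induction xs with
  | nil => simp [popCountA]
  | cons x xs ih =>
      simp only [popCountA]
      split
      · exact Nat.le_succ_of_le ih
      · simp

-- outer 'while queue: now = popleft; cnt = 1; <inner while>; answer.append(cnt)'
def groupsA : List Int → List Int
  | [] => []
  | now :: rest =>
      let pr := popCountA now rest
      (1 + pr.1) :: groupsA pr.2
termination_by xs => xs.length
decreasing_by
  exact Nat.lt_succ_of_le (popCountA_length now rest)

-- math.ceil((100-p)/s) is exact integer ceiling division on Dom (all |values| ≤ 2^31,
-- so the float quotient rounds within 1/|s| of the exact value); ported as -((-(100-p)) // s)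
def solution (progresses : List Int) (speeds : List Int) : List Int :=
  groupsA ((progresses.zip speeds).map (fun q => -(PySem.Int.floordiv (-(100 - q.1)) q.2)))

-- ===== PORT B =====
-- loop body of Source B: state = (answer, leader, count)
def stepB (st : List Int × Int × Int) (q : Int × Int) : List Int × Int × Int :=
  let d := -(PySem.Int.floordiv (q.1 - 100) q.2)
  if st.2.2 = 0 then (st.1, d, 1)
  else if d ≤ st.2.1 then (st.1, st.2.1, st.2.2 + 1)
  else (st.1 ++ [st.2.2], d, 1)

def solution_alt (progresses : List Int) (speeds : List Int) : List Int :=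
  let st := (progresses.zip speeds).foldl stepB ([], 0, 0)
  if st.2.2 ≠ 0 then st.1 ++ [st.2.2] else st.1

-- ===== PRECONDITION & SPEC =====
-- Pre_ excludes a zero speed among the zipped pairs, where Python A raises ZeroDivisionError.
def Pre_solution (progresses : List Int) (speeds : List Int) : Prop :=
  ∀ q ∈ progresses.zip speeds, q.2 ≠ 0
instance (progresses : List Int) (speeds : List Int) : Decidable (Pre_solution progresses speeds) := by unfold Pre_solution; infer_instance
def pvWitness_solution : List Int × List Int := ([93, 30, 55], [1, 30, 5])

def Spec_solution (progresses : List Int) (speeds : List Int) (out : List Int) : Prop := out = solution_alt progresses speeds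
instance (progresses : List Int) (speeds : List Int) (out : List Int) : Decidable (Spec_solution progresses speeds out) := by unfold Spec_solution; infer_instance

-- ===== CLAIM (what is proved, stated in full; the proofs are below) =====
def Claim_equal_solution : Prop := ∀ (progresses : List Int) (speeds : List Int), Dom_solution progresses speeds → Pre_solution progresses speeds → Spec_solution progresses speeds (solution progresses speeds)

-- ===== LEMMAS AND PROOFS =====

-- B's step with the day-count precomputed (stepB st q = stepB' st (day q), definitionally)
def stepB' (st : List Int × Int × Int) (d : Int) : List Int × Int × Int :=
  if st.2.2 = 0 then (st.1, d, 1)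
  else if d ≤ st.2.1 then (st.1, st.2.1, st.2.2 + 1)
  else (st.1 ++ [st.2.2], d, 1)

def finalizeB (st : List Int × Int × Int) : List Int :=
  if st.2.2 ≠ 0 then st.1 ++ [st.2.2] else st.1

theorem loop_invariant (ds : List Int) : ∀ (ans : List Int) (l c : Int), 0 < c →
    finalizeB (ds.foldl stepB' (ans, l, c))
      = ans ++ (c + (popCountA l ds).1) :: groupsA (popCountA l ds).2 := by
  induction ds with
  | nil =>
      intro ans l c hc
      simp [finalizeB, popCountA, groupsA]
      omega
  | cons d ds ih =>
      intro ans l c hc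
      by_cases hdl : d ≤ l
      · have hstep : stepB' (ans, l, c) d = (ans, l, c + 1) := by
          simp [stepB', hdl]
          omega
        simp only [List.foldl_cons, hstep, popCountA, hdl, if_pos]
        rw [ih ans l (c + 1) (by omega)]
        have : c + 1 + (popCountA l ds).1 = c + ((popCountA l ds).1 + 1) := by ring
        rw [this]
      · have hstep : stepB' (ans, l, c) d = (ans ++ [c], d, 1) := by
          simp [stepB', hdl]
          omega
        simp only [List.foldl_cons, hstep, popCountA, hdl, if_false]
        rw [ih (ans ++ [c]) d 1 (by omega)]
        simp [groupsA]

theorem fold_eq_groups (ds : List Int) :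
    finalizeB (ds.foldl stepB' ([], 0, 0)) = groupsA ds := by
  cases ds with
  | nil => simp [finalizeB, groupsA]
  | cons d ds =>
      have hstep : stepB' (([], 0, 0) : List Int × Int × Int) d = ([], d, 1) := by
        simp [stepB']
      simp only [List.foldl_cons, hstep]
      rw [loop_invariant ds [] d 1 (by omega)]
      simp [groupsA]

-- ===== VERDICT (by name: the statement is the Claim_ definition above) =====
theorem solution_spec : Claim_equal_solution := by
  intro progresses speeds _ _
  unfold Spec_solution solution solution_alt
  have hfold : (progresses.zip speeds).foldl stepB ([], 0, 0)
      = ((progresses.zip speeds).map (fun q => -(PySem.Int.floordiv (q.1 - 100) q.2))).foldl stepB' ([], 0, 0) := by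
    rw [List.foldl_map]
    rfl
  have hmap : (progresses.zip speeds).map (fun q => -(PySem.Int.floordiv (q.1 - 100) q.2))
      = (progresses.zip speeds).map (fun q => -(PySem.Int.floordiv (-(100 - q.1)) q.2)) := by
    apply List.map_congr_left
    intro q _
    rw [show q.1 - 100 = -(100 - q.1) from by ring]
  rw [show (if ((progresses.zip speeds).foldl stepB ([], 0, 0)).2.2 ≠ 0
        then ((progresses.zip speeds).foldl stepB ([], 0, 0)).1 ++ [((progresses.zip speeds).foldl stepB ([], 0, 0)).2.2]
        else ((progresses.zip speeds).foldl stepB ([], 0, 0)).1)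
      = finalizeB ((progresses.zip speeds).foldl stepB ([], 0, 0)) from rfl]
  rw [hfold, hmap, fold_eq_groups]
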